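-- pv_equiv track=rewrite | github.com/shouldsee/golly_utils | archive/life32togolly.py | create_table_row
-- ===== SOURCE A (Python) =====
-- notationdict = {
--                  "1e" : "1,0,0,0,0,0,0,0",  #   N
--                  "1c" : "0,1,0,0,0,0,0,0",  #   NE
--                  "2a" : "1,1,0,0,0,0,0,0",  #   N,  NE
--                  "2e" : "1,0,1,0,0,0,0,0",  #   N,  E
--                  "2k" : "1,0,0,1,0,0,0,0",  #   N,  SE
--                  "2i" : "1,0,0,0,1,0,0,0",  #   N,  S
--                  "2c" : "0,1,0,1,0,0,0,0",  #   NE, SE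
--                  "2v" : "0,1,0,0,0,1,0,0",  #   NE, SW
--                  "3a" : "1,1,1,0,0,0,0,0",  #   N,  NE, E
--                  "3v" : "1,1,0,1,0,0,0,0",  #   N,  NE, SE
--                  "3y" : "1,1,0,0,1,0,0,0",  #   N,  NE, S      (3r in non-swapped notation)
--                  "3q" : "1,1,0,0,0,1,0,0",  #   N,  NE, SW
--                  "3j" : "1,1,0,0,0,0,1,0",  #   N,  NE, W
--                  "3i" : "1,1,0,0,0,0,0,1",  #   N,  NE, NW
--                  "3e" : "1,0,1,0,1,0,0,0",  #   N,  E,  S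
--                  "3k" : "1,0,1,0,0,1,0,0",  #   N,  E,  SW
--                  "3r" : "1,0,0,1,0,1,0,0",  #   N,  SE, SW     (3y in non-swapped notation)
--                  "3c" : "0,1,0,1,0,1,0,0",  #   NE, SE, SW
--                  "4a" : "1,1,1,1,0,0,0,0",  #   N,  NE, E,  SE
--                  "4y" : "1,1,1,0,1,0,0,0",  #   N,  NE, E,  S  (4r in non-swapped notation)
--                  "4q" : "1,1,1,0,0,1,0,0",  #   N,  NE, E,  SW
--                  "4i" : "1,1,0,1,1,0,0,0",  #   N,  NE, SE, S
--                  "4r" : "1,1,0,1,0,1,0,0",  #   N,  NE, SE, SW (4y in non-swapped notation)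
--                  "4k" : "1,1,0,1,0,0,1,0",  #   N,  NE, SE, W
--                  "4v" : "1,1,0,1,0,0,0,1",  #   N,  NE, SE, NW
--                  "4z" : "1,1,0,0,1,1,0,0",  #   N,  NE, S,  SW
--                  "4j" : "1,1,0,0,1,0,1,0",  #   N,  NE, S,  W
--                  "4t" : "1,1,0,0,1,0,0,1",  #   N,  NE, S,  NW
--                  "4w" : "1,1,0,0,0,1,1,0",  #   N,  NE, SW, W
--                  "4e" : "1,0,1,0,1,0,1,0",  #   N,  E,  S,  W
--                  "4c" : "0,1,0,1,0,1,0,1",  #   NE, SE, SW, NW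
--                  "5a" : "0,0,0,1,1,1,1,1",  #   SE, S,  SW, W,  NW
--                  "5v" : "0,0,1,0,1,1,1,1",  #   E,  S,  SW, W,  NW
--                  "5y" : "0,0,1,1,0,1,1,1",  #   E,  SE, SW, W,  NW (5r in non-swapped notation)
--                  "5q" : "0,0,1,1,1,0,1,1",  #   E,  SE, S,  W,  NW
--                  "5j" : "0,0,1,1,1,1,0,1",  #   E,  SE, S,  SW, NW
--                  "5i" : "0,0,1,1,1,1,1,0",  #   E,  SE, S,  SW, W
--                  "5e" : "0,1,0,1,0,1,1,1",  #   NE, SE, SW, W,  NW,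
--                  "5k" : "0,1,0,1,1,0,1,1",  #   NE, SE, S,  W,  NW
--                  "5r" : "0,1,1,0,1,0,1,1",  #   NE, E,  S,  W, NW  (5y in non-swapped notation)
--                  "5c" : "1,0,1,0,1,0,1,1",  #   N,  E,  S,  W,  NW
--                  "6a" : "0,0,1,1,1,1,1,1",  #   E,  SE, S,  SW, W,  NW
--                  "6e" : "0,1,0,1,1,1,1,1",  #   NE, SE, S,  SW, W,  NW
--                  "6k" : "0,1,1,0,1,1,1,1",  #   NE, E,  S,  SW, W,  NW
--                  "6i" : "0,1,1,1,0,1,1,1",  #   NE, E,  SE, SW, W,  NW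
--                  "6c" : "1,0,1,0,1,1,1,1",  #   N,  E,  S,  SW, W,  NW
--                  "6v" : "1,0,1,1,1,0,1,1",  #   N,  E,  SE, S,  W,  NW
--                  "7e" : "0,1,1,1,1,1,1,1",  #   NE, E,  SE, S,  SW, W,  NW
--                  "7c" : "1,0,1,1,1,1,1,1"   #   N,  E,  SE, S,  SW, W,  NW
--                 }
--
-- def create_table_row(bs,totalistic_num, notation_letter, inverse_list):
--    result = ""
--    if totalistic_num == "0":
--      result = bs + "0,0,0,0,0,0,0,0" + ",1"+"\n"
--    elif totalistic_num == "8":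
--      result = bs + "1,1,1,1,1,1,1,1" + ",1" +"\n"
--    elif notation_letter != "none":
--       result = bs + notationdict[totalistic_num+notation_letter] + ",1" +"\n"
--    elif inverse_list != []:
--       for i in notationdict:
--          if not (i[1] in inverse_list) and i.startswith(totalistic_num):
--             result = result +  bs + notationdict[i] + ",1" +"\n"
--    else:
--       for i in notationdict:
--          if i.startswith(totalistic_num):
--             result = result +  bs + notationdict[i] + ",1" + "\n"
--    return result
-- ===== SOURCE B (Python) =====
-- notationdict = {
--                  "1e" : "1,0,0,0,0,0,0,0",
--                  "1c" : "0,1,0,0,0,0,0,0",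
--                  "2a" : "1,1,0,0,0,0,0,0",
--                  "2e" : "1,0,1,0,0,0,0,0",
--                  "2k" : "1,0,0,1,0,0,0,0",
--                  "2i" : "1,0,0,0,1,0,0,0",
--                  "2c" : "0,1,0,1,0,0,0,0",
--                  "2v" : "0,1,0,0,0,1,0,0",
--                  "3a" : "1,1,1,0,0,0,0,0",
--                  "3v" : "1,1,0,1,0,0,0,0",
--                  "3y" : "1,1,0,0,1,0,0,0",
--                  "3q" : "1,1,0,0,0,1,0,0",
--                  "3j" : "1,1,0,0,0,0,1,0",
--                  "3i" : "1,1,0,0,0,0,0,1",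
--                  "3e" : "1,0,1,0,1,0,0,0",
--                  "3k" : "1,0,1,0,0,1,0,0",
--                  "3r" : "1,0,0,1,0,1,0,0",
--                  "3c" : "0,1,0,1,0,1,0,0",
--                  "4a" : "1,1,1,1,0,0,0,0",
--                  "4y" : "1,1,1,0,1,0,0,0",
--                  "4q" : "1,1,1,0,0,1,0,0",
--                  "4i" : "1,1,0,1,1,0,0,0",
--                  "4r" : "1,1,0,1,0,1,0,0",
--                  "4k" : "1,1,0,1,0,0,1,0",
--                  "4v" : "1,1,0,1,0,0,0,1",
--                  "4z" : "1,1,0,0,1,1,0,0",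
--                  "4j" : "1,1,0,0,1,0,1,0",
--                  "4t" : "1,1,0,0,1,0,0,1",
--                  "4w" : "1,1,0,0,0,1,1,0",
--                  "4e" : "1,0,1,0,1,0,1,0",
--                  "4c" : "0,1,0,1,0,1,0,1",
--                  "5a" : "0,0,0,1,1,1,1,1",
--                  "5v" : "0,0,1,0,1,1,1,1",
--                  "5y" : "0,0,1,1,0,1,1,1",
--                  "5q" : "0,0,1,1,1,0,1,1",
--                  "5j" : "0,0,1,1,1,1,0,1",
--                  "5i" : "0,0,1,1,1,1,1,0",
--                  "5e" : "0,1,0,1,0,1,1,1",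
--                  "5k" : "0,1,0,1,1,0,1,1",
--                  "5r" : "0,1,1,0,1,0,1,1",
--                  "5c" : "1,0,1,0,1,0,1,1",
--                  "6a" : "0,0,1,1,1,1,1,1",
--                  "6e" : "0,1,0,1,1,1,1,1",
--                  "6k" : "0,1,1,0,1,1,1,1",
--                  "6i" : "0,1,1,1,0,1,1,1",
--                  "6c" : "1,0,1,0,1,1,1,1",
--                  "6v" : "1,0,1,1,1,0,1,1",
--                  "7e" : "0,1,1,1,1,1,1,1",
--                  "7c" : "1,0,1,1,1,1,1,1"
--                 }
--
-- # Prefix index, built once: every prefix of a key -> ordered (letter, value) pairs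
-- # of the keys it matches.  A whole row-selection is then one dictionary lookup.
-- PREFIX_GROUPS = {}
-- for _k, _v in notationdict.items():
--     for _i in range(len(_k) + 1):
--         PREFIX_GROUPS.setdefault(_k[:_i], []).append((_k[1], _v))
--
-- def create_table_row(bs, totalistic_num, notation_letter, inverse_list):
--     if totalistic_num == "0":
--         return bs + "0,0,0,0,0,0,0,0,1\n"
--     if totalistic_num == "8":
--         return bs + "1,1,1,1,1,1,1,1,1\n"
--     if notation_letter != "none":
--         return bs + notationdict[totalistic_num + notation_letter] + ",1\n"
--     group = PREFIX_GROUPS.get(totalistic_num, [])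
--     rows = [bs + value + ",1\n"
--             for letter, value in group
--             if letter not in inverse_list]
--     return "".join(rows)
-- ===== Notes on version B (the rewrite author's own statement) =====
-- stated objective: simpler
-- what changed: B builds a module-level prefix index (every prefix of a notationdict key -> its ordered (letter,value) group) once, so a whole row selection becomes a single dictionary lookup plus one filtered render, replacing A's per-call scan of the whole dict and its two duplicated filter loops.
import Mathlib
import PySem

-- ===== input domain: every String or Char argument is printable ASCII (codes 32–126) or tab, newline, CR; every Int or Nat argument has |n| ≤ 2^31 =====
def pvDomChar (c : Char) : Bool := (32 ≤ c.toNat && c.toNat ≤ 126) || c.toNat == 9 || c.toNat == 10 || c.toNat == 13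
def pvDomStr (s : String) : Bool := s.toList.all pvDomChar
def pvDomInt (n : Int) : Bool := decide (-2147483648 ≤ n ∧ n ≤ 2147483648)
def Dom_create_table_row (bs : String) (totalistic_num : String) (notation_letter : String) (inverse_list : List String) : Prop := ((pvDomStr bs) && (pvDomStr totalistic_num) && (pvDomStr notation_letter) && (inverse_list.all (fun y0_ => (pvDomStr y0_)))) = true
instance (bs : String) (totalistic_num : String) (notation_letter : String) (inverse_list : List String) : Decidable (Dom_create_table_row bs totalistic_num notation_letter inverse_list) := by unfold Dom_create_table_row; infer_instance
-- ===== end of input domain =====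

set_option maxRecDepth 40000


-- B replaces A's per-call scan of notationdict by one lookup in a prefix index
-- (every key prefix -> its (letter, value) group) built once at module level (objective: simpler).

-- ===== PORT A =====
-- the module constant notationdict, in insertion order (shared data of both programs)
def notationdict : List (String × String) :=
  [("1e", "1,0,0,0,0,0,0,0"), ("1c", "0,1,0,0,0,0,0,0"),
   ("2a", "1,1,0,0,0,0,0,0"), ("2e", "1,0,1,0,0,0,0,0"), ("2k", "1,0,0,1,0,0,0,0"),
   ("2i", "1,0,0,0,1,0,0,0"), ("2c", "0,1,0,1,0,0,0,0"), ("2v", "0,1,0,0,0,1,0,0"),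
   ("3a", "1,1,1,0,0,0,0,0"), ("3v", "1,1,0,1,0,0,0,0"), ("3y", "1,1,0,0,1,0,0,0"),
   ("3q", "1,1,0,0,0,1,0,0"), ("3j", "1,1,0,0,0,0,1,0"), ("3i", "1,1,0,0,0,0,0,1"),
   ("3e", "1,0,1,0,1,0,0,0"), ("3k", "1,0,1,0,0,1,0,0"), ("3r", "1,0,0,1,0,1,0,0"),
   ("3c", "0,1,0,1,0,1,0,0"),
   ("4a", "1,1,1,1,0,0,0,0"), ("4y", "1,1,1,0,1,0,0,0"), ("4q", "1,1,1,0,0,1,0,0"),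
   ("4i", "1,1,0,1,1,0,0,0"), ("4r", "1,1,0,1,0,1,0,0"), ("4k", "1,1,0,1,0,0,1,0"),
   ("4v", "1,1,0,1,0,0,0,1"), ("4z", "1,1,0,0,1,1,0,0"), ("4j", "1,1,0,0,1,0,1,0"),
   ("4t", "1,1,0,0,1,0,0,1"), ("4w", "1,1,0,0,0,1,1,0"), ("4e", "1,0,1,0,1,0,1,0"),
   ("4c", "0,1,0,1,0,1,0,1"),
   ("5a", "0,0,0,1,1,1,1,1"), ("5v", "0,0,1,0,1,1,1,1"), ("5y", "0,0,1,1,0,1,1,1"),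
   ("5q", "0,0,1,1,1,0,1,1"), ("5j", "0,0,1,1,1,1,0,1"), ("5i", "0,0,1,1,1,1,1,0"),
   ("5e", "0,1,0,1,0,1,1,1"), ("5k", "0,1,0,1,1,0,1,1"), ("5r", "0,1,1,0,1,0,1,1"),
   ("5c", "1,0,1,0,1,0,1,1"),
   ("6a", "0,0,1,1,1,1,1,1"), ("6e", "0,1,0,1,1,1,1,1"), ("6k", "0,1,1,0,1,1,1,1"),
   ("6i", "0,1,1,1,0,1,1,1"), ("6c", "1,0,1,0,1,1,1,1"), ("6v", "1,0,1,1,1,0,1,1"),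
   ("7e", "0,1,1,1,1,1,1,1"), ("7c", "1,0,1,1,1,1,1,1")]

-- notationdict[k]; the KeyError case (k absent) is excluded by Pre_create_table_row,
-- so the .getD "" default is never reached on admitted inputs
def nd_get (k : String) : String :=
  ((notationdict.find? (fun p => p.1 == k)).map Prod.snd).getD ""

-- s[i] as a one-character string (exact here: every string it is applied to has length 2,
-- so the index is always in range and the .getD "" default is never reached)
def chr1 (s : String) (i : Int) : String :=
  ((PySem.Str.pyGet? s i).map (fun c => String.ofList [c])).getD ""

def create_table_row (bs : String) (totalistic_num : String) (notation_letter : String) (inverse_list : List String) : String :=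
  if totalistic_num == "0" then bs ++ "0,0,0,0,0,0,0,0" ++ ",1" ++ "\n"
  else if totalistic_num == "8" then bs ++ "1,1,1,1,1,1,1,1" ++ ",1" ++ "\n"
  else if notation_letter != "none" then
    bs ++ nd_get (totalistic_num ++ notation_letter) ++ ",1" ++ "\n"
  else if inverse_list != [] then
    notationdict.foldl (fun result p =>
      if !(inverse_list.contains (chr1 p.1 1)) && PySem.Str.startswith p.1 totalistic_num then
        result ++ bs ++ nd_get p.1 ++ ",1" ++ "\n"
      else result) ""
  else
    notationdict.foldl (fun result p =>
      if PySem.Str.startswith p.1 totalistic_num then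
        result ++ bs ++ nd_get p.1 ++ ",1" ++ "\n"
      else result) ""

-- ===== PORT B =====
-- notationdict viewed as the dict it is in Python (same assoc list; [k] lookup = Dict.getD,
-- default unreachable under Pre_)
def ndB : PySem.Dict String String := PySem.Dict.mk notationdict

-- PREFIX_GROUPS: every prefix k[:i] of a key -> ordered (letter, value) pairs;
-- setdefault(..).append(..) is Dict.modify with default []
def PREFIX_GROUPS : PySem.Dict String (List (String × String)) :=
  notationdict.foldl
    (fun g p =>
      (PySem.List.pyRange 0 (PySem.Str.len p.1 + 1) 1).foldl
        (fun g i =>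
          g.modify (PySem.Str.slice p.1 none (some i)) []
            (fun l => l ++ [(chr1 p.1 1, p.2)])) g)
    PySem.Dict.empty

def create_table_row_alt (bs : String) (totalistic_num : String) (notation_letter : String) (inverse_list : List String) : String :=
  if totalistic_num == "0" then bs ++ "0,0,0,0,0,0,0,0,1\n"
  else if totalistic_num == "8" then bs ++ "1,1,1,1,1,1,1,1,1\n"
  else if notation_letter != "none" then
    bs ++ ndB.getD (totalistic_num ++ notation_letter) "" ++ ",1\n"
  else
    let group := PREFIX_GROUPS.getD totalistic_num []
    let rows := (group.filter (fun q => !(inverse_list.contains q.1))).map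
      (fun q => bs ++ q.2 ++ ",1\n")
    PySem.Str.join "" rows

-- ===== PRECONDITION & SPEC =====
-- Pre_ excludes exactly the KeyError inputs: notation_letter ≠ "none" with
-- totalistic_num ≠ "0","8" and totalistic_num ++ notation_letter not a key of notationdict
-- (there Python A raises KeyError; B raises the same KeyError).
def Pre_create_table_row (bs : String) (totalistic_num : String) (notation_letter : String) (inverse_list : List String) : Prop :=
  totalistic_num = "0" ∨ totalistic_num = "8" ∨ notation_letter = "none" ∨
    (notationdict.any (fun p => p.1 == totalistic_num ++ notation_letter)) = true
instance (bs : String) (totalistic_num : String) (notation_letter : String) (inverse_list : List String) : Decidable (Pre_create_table_row bs totalistic_num notation_letter inverse_list) := by unfold Pre_create_table_row; infer_instance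

def pvWitness_create_table_row : String × String × String × List String :=
  ("n1,", "3", "none", ["c", "q"])

def Spec_create_table_row (bs : String) (totalistic_num : String) (notation_letter : String) (inverse_list : List String) (out : String) : Prop := out = create_table_row_alt bs totalistic_num notation_letter inverse_list
instance (bs : String) (totalistic_num : String) (notation_letter : String) (inverse_list : List String) (out : String) : Decidable (Spec_create_table_row bs totalistic_num notation_letter inverse_list out) := by unfold Spec_create_table_row; infer_instance

-- ===== CLAIM (what is proved, stated in full; the proofs are below) =====
def Claim_equal_create_table_row : Prop := ∀ (bs : String) (totalistic_num : String) (notation_letter : String) (inverse_list : List String), Dom_create_table_row bs totalistic_num notation_letter inverse_list → Pre_create_table_row bs totalistic_num notation_letter inverse_list → Spec_create_table_row bs totalistic_num notation_letter inverse_list (create_table_row bs totalistic_num notation_letter inverse_list)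

-- ===== LEMMAS AND PROOFS =====

-- (letter, value) view of a notationdict entry
def toLV (p : String × String) : String × String := (chr1 p.1 1, p.2)

theorem join_empty_nil : PySem.Str.join "" [] = "" := by decide

theorem join_empty_cons (a : String) (l : List String) :
    PySem.Str.join "" (a :: l) = a ++ PySem.Str.join "" l := by
  cases l <;> simp [PySem.Str.join, PySem.Chars.join, List.intercalate]

-- A's accumulation loop, as a join over the filtered list
theorem foldl_render (bs u v : String) (cond : String × String → Bool)
    (g : String × String → String) :
    ∀ (l : List (String × String)) (acc : String),
      l.foldl (fun r p => if cond p then r ++ bs ++ g p ++ u ++ v else r) acc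
        = acc ++ PySem.Str.join "" ((l.filter cond).map (fun p => bs ++ g p ++ u ++ v)) := by
  intro l
  induction l with
  | nil => intro acc; simp [join_empty_nil]
  | cons p t ih =>
    intro acc
    by_cases h : cond p = true
    · simp only [List.foldl_cons, List.filter_cons, h, if_pos, List.map_cons, join_empty_cons]
      rw [ih]
      simp [String.append_assoc]
    · simp only [List.foldl_cons, List.filter_cons, Bool.not_eq_true] at *
      simp [h, ih]

-- every value that A renders with nd_get is the entry's own value
theorem nd_get_self : ∀ p ∈ notationdict, nd_get p.1 = p.2 := by decide

-- pushing the (letter, value) view through filter and map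
theorem map_filter_toLV (c : String → Bool) (F : String → String) :
    ∀ l : List (String × String), (∀ p ∈ l, nd_get p.1 = p.2) →
      ((l.filter (fun p => c (chr1 p.1 1))).map (fun p => F (nd_get p.1)))
        = ((l.map toLV).filter (fun q => c q.1)).map (fun q => F q.2) := by
  intro l
  induction l with
  | nil => intro _; rfl
  | cons p t ih =>
    intro hall
    have hp := hall p (by simp)
    have ht : ∀ q ∈ t, nd_get q.1 = q.2 := fun q hq => hall q (List.mem_cons_of_mem _ hq)
    by_cases h : c (chr1 p.1 1) = true
    · simp [toLV, h, ih ht, hp]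
    · simp only [Bool.not_eq_true] at h
      simp [toLV, h, ih ht]

-- nested loop over each key's prefixes = one loop over the flattened (prefix, entry) pairs
theorem foldl_foldl_flatMap {α β γ : Type} (l : List α) (f : α → List β)
    (g : γ → β → γ) :
    ∀ init : γ, l.foldl (fun acc x => (f x).foldl g acc) init = (l.flatMap f).foldl g init := by
  induction l with
  | nil => intro init; rfl
  | cons h t ih => intro init; simp [List.flatMap_cons, List.foldl_append, ih]

-- the prefixes k[:0], k[:1], k[:2] of a two-character key
theorem prefList_pair (a b : Char) :
    (PySem.List.pyRange 0 (PySem.Str.len (String.ofList [a, b]) + 1) 1).map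
        (fun i => PySem.Str.slice (String.ofList [a, b]) none (some i))
      = ["", String.ofList [a], String.ofList [a, b]] := by
  have h : PySem.Str.len (String.ofList [a, b]) = 2 := by simp [PySem.Str.len_eq]
  rw [h]
  have hr : PySem.List.pyRange 0 (2 + 1) 1 = [0, 1, 2] := by decide
  rw [hr]
  simp only [List.map_cons, List.map_nil, List.cons.injEq, and_true]
  refine ⟨?_, ?_, ?_⟩ <;> apply String.ext <;>
    rw [PySem.Str.toList_slice, PySem.Chars.slice_eq_listSlice,
        PySem.List.slice_to _ (by omega)] <;> simp

theorem prefix_cases (a b : Char) (l : List Char) (h : l <+: [a, b]) :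
    l = [] ∨ l = [a] ∨ l = [a, b] := by
  rcases l with _ | ⟨x, _ | ⟨y, t⟩⟩
  · exact Or.inl rfl
  · right; left
    rcases h with ⟨r, hr⟩; simp at hr; simp [hr.1]
  · right; right
    rcases h with ⟨r, hr⟩; simp at hr
    obtain ⟨h1, h2, h3, _⟩ := hr
    simp [h1, h2, h3]

-- the prefixes of a key are pairwise distinct, so at most one matches tn —
-- and one does exactly when tn is a prefix of the key
theorem prefix_filter {α : Type} (a b : Char) (x : α) (tn : String) :
    (((["", String.ofList [a], String.ofList [a, b]]).map (fun pre => (pre, x))).filter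
        (fun q => q.1 == tn)).map Prod.snd
      = if PySem.Str.startswith (String.ofList [a, b]) tn = true then [x] else [] := by
  have hsw : PySem.Str.startswith (String.ofList [a, b]) tn = true ↔ tn.toList <+: [a, b] := by
    rw [PySem.Str.startswith_eq]
    simpa using PySem.Chars.startswith_iff (String.ofList [a, b]).toList tn.toList
  by_cases h0 : tn = ""
  · subst h0
    rw [if_pos (hsw.mpr (by simp))]
    simp [String.ext_iff]
  by_cases h1 : tn = String.ofList [a]
  · subst h1
    rw [if_pos (hsw.mpr (by simp))]
    have e0 : ¬("" = String.ofList [a]) := by simp [String.ext_iff]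
    have e2 : ¬(String.ofList [a, b] = String.ofList [a]) := by simp [String.ext_iff]
    simp [e0, e2]
  by_cases h2 : tn = String.ofList [a, b]
  · subst h2
    rw [if_pos (hsw.mpr (by simp))]
    have e0 : ¬("" = String.ofList [a, b]) := by simp [String.ext_iff]
    have e1 : ¬(String.ofList [a] = String.ofList [a, b]) := by simp [String.ext_iff]
    simp [e0, e1]
  · have hnp : ¬ (tn.toList <+: [a, b]) := by
      intro h
      rcases prefix_cases a b _ h with h' | h' | h' <;>
        [exact h0 (by apply String.ext; simpa using h');
         exact h1 (by apply String.ext; simpa using h');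
         exact h2 (by apply String.ext; simpa using h')]
    rw [if_neg (by rw [hsw]; exact hnp)]
    have e0 : ¬("" = tn) := fun h => h0 h.symm
    have e1 : ¬(String.ofList [a] = tn) := fun h => h1 h.symm
    have e2 : ¬(String.ofList [a, b] = tn) := fun h => h2 h.symm
    simp [e0, e1, e2]

-- every key of notationdict is a two-character string
theorem key_two_chars : ∀ p ∈ notationdict,
    p.1 = String.ofList [p.1.toList.getD 0 ' ', p.1.toList.getD 1 ' '] := by decide

theorem flatMap_congr_mem {α β : Type} (l : List α) (f f' : α → List β)
    (h : ∀ x ∈ l, f x = f' x) : l.flatMap f = l.flatMap f' := by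
  induction l with
  | nil => rfl
  | cons a t ih =>
    simp only [List.flatMap_cons, h a (by simp), ih (fun x hx => h x (by simp [hx]))]

theorem filter_map_flatMap {α β γ : Type} (l : List α) (f : α → List β)
    (q : β → Bool) (g : β → γ) :
    ((l.flatMap f).filter q).map g = l.flatMap (fun x => ((f x).filter q).map g) := by
  induction l with
  | nil => rfl
  | cons a t ih => simp [List.flatMap_cons, List.filter_append, List.map_append, ih]

theorem flatMap_if_singleton {α β : Type} (l : List α) (c : α → Bool) (g : α → β) :
    l.flatMap (fun x => if c x = true then [g x] else []) = (l.filter c).map g := by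
  induction l with
  | nil => rfl
  | cons a t ih =>
    by_cases h : c a = true
    · simp [List.flatMap_cons, h, ih]
    · simp only [Bool.not_eq_true] at h
      simp [List.flatMap_cons, h, ih]

-- the prefix index, looked up at ANY string, is exactly A's startswith scan in (letter, value) view
theorem PG_getD (tn : String) :
    PREFIX_GROUPS.getD tn []
      = (notationdict.filter (fun p => PySem.Str.startswith p.1 tn)).map toLV := by
  unfold PREFIX_GROUPS
  have hinner : ∀ (p : String × String) (g : PySem.Dict String (List (String × String))),
      (PySem.List.pyRange 0 (PySem.Str.len p.1 + 1) 1).foldl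
          (fun g i =>
            g.modify (PySem.Str.slice p.1 none (some i)) []
              (fun l => l ++ [(chr1 p.1 1, p.2)])) g
        = ((PySem.List.pyRange 0 (PySem.Str.len p.1 + 1) 1).map
            (fun i => (PySem.Str.slice p.1 none (some i), toLV p))).foldl
            (fun d q => d.modify q.1 [] (fun l => l ++ [q.2])) g := by
    intro p g
    rw [List.foldl_map]
    rfl
  calc (notationdict.foldl
        (fun g p =>
          (PySem.List.pyRange 0 (PySem.Str.len p.1 + 1) 1).foldl
            (fun g i =>
              g.modify (PySem.Str.slice p.1 none (some i)) []
                (fun l => l ++ [(chr1 p.1 1, p.2)])) g)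
        PySem.Dict.empty).getD tn []
      = ((notationdict.flatMap
            (fun p => (PySem.List.pyRange 0 (PySem.Str.len p.1 + 1) 1).map
              (fun i => (PySem.Str.slice p.1 none (some i), toLV p)))).foldl
            (fun d q => d.modify q.1 [] (fun l => l ++ [q.2]))
            PySem.Dict.empty).getD tn [] := by
        rw [← foldl_foldl_flatMap]
        have hfun : (fun (g : PySem.Dict String (List (String × String))) (p : String × String) =>
            (PySem.List.pyRange 0 (PySem.Str.len p.1 + 1) 1).foldl
              (fun g i =>
                g.modify (PySem.Str.slice p.1 none (some i)) []
                  (fun l => l ++ [(chr1 p.1 1, p.2)])) g)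
          = (fun (acc : PySem.Dict String (List (String × String))) (x : String × String) =>
              ((PySem.List.pyRange 0 (PySem.Str.len x.1 + 1) 1).map
                (fun i => (PySem.Str.slice x.1 none (some i), toLV x))).foldl
                (fun d q => d.modify q.1 [] (fun l => l ++ [q.2])) acc) := by
          funext g p
          exact hinner p g
        rw [hfun]
    _ = (notationdict.flatMap
            (fun p => ((((PySem.List.pyRange 0 (PySem.Str.len p.1 + 1) 1).map
              (fun i => (PySem.Str.slice p.1 none (some i), toLV p))).filter
                (fun q => q.1 == tn)).map Prod.snd))) := by
        rw [PySem.Dict.getD_foldl_modify_append]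
        rw [PySem.Dict.getD_empty]
        rw [filter_map_flatMap]
        rfl
    _ = notationdict.flatMap
          (fun p => if PySem.Str.startswith p.1 tn = true then [toLV p] else []) := by
        apply flatMap_congr_mem
        intro p hp
        have hk := key_two_chars p hp
        rw [hk]
        have hpl := prefList_pair (p.1.toList.getD 0 ' ') (p.1.toList.getD 1 ' ')
        rw [show ((PySem.List.pyRange 0
              (PySem.Str.len (String.ofList [p.1.toList.getD 0 ' ', p.1.toList.getD 1 ' ']) + 1) 1).map
              (fun i => (PySem.Str.slice (String.ofList [p.1.toList.getD 0 ' ', p.1.toList.getD 1 ' ']) none (some i),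
                toLV p)))
            = (["", String.ofList [p.1.toList.getD 0 ' '],
                String.ofList [p.1.toList.getD 0 ' ', p.1.toList.getD 1 ' ']].map
                (fun pre => (pre, toLV p))) by
          rw [← hpl]; rw [List.map_map]; rfl]
        exact prefix_filter _ _ _ tn
    _ = (notationdict.filter (fun p => PySem.Str.startswith p.1 tn)).map toLV :=
        flatMap_if_singleton _ _ _

theorem nd_keys_nodup : (PySem.Dict.mk notationdict).keys.Nodup := by decide

-- the main loop cases: A's filtered scan = render of B's prefix-index group
theorem render_eq (bs tn : String) (inv : List String) :
    (if inv != [] then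
      notationdict.foldl (fun result p =>
        if !(inv.contains (chr1 p.1 1)) && PySem.Str.startswith p.1 tn then
          result ++ bs ++ nd_get p.1 ++ ",1" ++ "\n"
        else result) ""
    else
      notationdict.foldl (fun result p =>
        if PySem.Str.startswith p.1 tn then
          result ++ bs ++ nd_get p.1 ++ ",1" ++ "\n"
        else result) "")
    = PySem.Str.join ""
        (((PREFIX_GROUPS.getD tn []).filter
            (fun q => !(inv.contains q.1))).map (fun q => bs ++ q.2 ++ ",1" ++ "\n")) := by
  rw [PG_getD]
  have hall : ∀ p ∈ notationdict.filter (fun p => PySem.Str.startswith p.1 tn),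
      nd_get p.1 = p.2 := fun p hp => nd_get_self p (List.mem_of_mem_filter hp)
  by_cases hinv : inv = []
  · subst hinv
    rw [if_neg (by simp)]
    rw [foldl_render bs ",1" "\n" (fun p => PySem.Str.startswith p.1 tn) (fun p => nd_get p.1)]
    have h1 : ∀ l : List (String × String),
        l.filter (fun q : String × String => !(([] : List String).contains q.1)) = l := by
      intro l; simp
    rw [h1]
    have h2 := map_filter_toLV (fun _ : String => true) (fun s => bs ++ s ++ ",1" ++ "\n")
      (notationdict.filter (fun p => PySem.Str.startswith p.1 tn)) hall
    simp only [List.filter_true] at h2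
    rw [h2]
    simp
  · rw [if_pos (by simp [hinv])]
    rw [foldl_render bs ",1" "\n"
      (fun p => !(inv.contains (chr1 p.1 1)) && PySem.Str.startswith p.1 tn)
      (fun p => nd_get p.1)]
    rw [← List.filter_filter]
    rw [map_filter_toLV (fun s => !(inv.contains s)) (fun s => bs ++ s ++ ",1" ++ "\n")
      (notationdict.filter (fun p => PySem.Str.startswith p.1 tn)) hall]
    simp

-- ===== VERDICT (by name: the statement is the Claim_ definition above) =====
theorem create_table_row_spec : Claim_equal_create_table_row := by
  intro bs tn nl inv _hdom hpre
  unfold Spec_create_table_row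
  by_cases h0 : tn = "0"
  · subst h0
    unfold create_table_row create_table_row_alt
    simp [String.append_assoc]
  by_cases h8 : tn = "8"
  · subst h8
    unfold create_table_row create_table_row_alt
    simp [String.append_assoc]
  by_cases hnl : nl = "none"
  case neg =>
    have hk : (notationdict.any (fun p => p.1 == tn ++ nl)) = true := by
      rcases hpre with h | h | h | h
      · exact absurd h h0
      · exact absurd h h8
      · exact absurd h hnl
      · exact h
    obtain ⟨p, hp, hpeq⟩ := List.any_eq_true.mp hk
    simp only [beq_iff_eq] at hpeq
    have hA : nd_get (tn ++ nl) = p.2 := by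
      rw [← hpeq]; exact nd_get_self p hp
    have hB : ndB.getD (tn ++ nl) "" = p.2 := by
      rw [← hpeq]
      exact PySem.Dict.getD_of_mem_items (PySem.Dict.mk notationdict) hp nd_keys_nodup ""
    unfold create_table_row create_table_row_alt
    rw [if_neg (by simp [h0]), if_neg (by simp [h8]),
        if_pos (by simp [hnl]),
        if_neg (by simp [h0]), if_neg (by simp [h8]),
        if_pos (by simp [hnl])]
    rw [hA, hB]
    simp [String.append_assoc]
  case pos =>
  subst hnl
  have hA0 : create_table_row bs tn "none" inv
      = (if inv != [] then
          notationdict.foldl (fun result p =>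
            if !(inv.contains (chr1 p.1 1)) && PySem.Str.startswith p.1 tn then
              result ++ bs ++ nd_get p.1 ++ ",1" ++ "\n"
            else result) ""
        else
          notationdict.foldl (fun result p =>
            if PySem.Str.startswith p.1 tn then
              result ++ bs ++ nd_get p.1 ++ ",1" ++ "\n"
            else result) "") := by
    unfold create_table_row
    rw [if_neg (by simp [h0])]
    rw [if_neg (by simp [h8])]
    rw [if_neg (by simp)]
  rw [hA0, render_eq bs tn inv]
  unfold create_table_row_alt
  rw [if_neg (by simp [h0]), if_neg (by simp [h8]), if_neg (by simp)]
  have hstr : (",1" ++ "\n" : String) = ",1\n" := by decide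
  simp only [String.append_assoc, hstr]
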